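-- pv_equiv track=rewrite | github.com/runpod/flash-examples | 02_ml_inference/02_code_review_agent/cpu_worker.py | _strip_binary_hunks
-- ===== SOURCE A (Python) =====
-- def _strip_binary_hunks(diff: str) -> str:
--     """Remove binary file diffs, keeping only text changes."""
--     lines = diff.splitlines(keepends=True)
--     result = []
--     skip = False
--     for line in lines:
--         if line.startswith("Binary files ") or line.startswith("GIT binary patch"):
--             skip = True
--             continue
--         if skip and line.startswith("diff --git "):
--             skip = False
--         if not skip:
--             result.append(line)
--     return "".join(result)
-- ===== SOURCE B (Python) =====
-- def _strip_binary_hunks(diff: str) -> str: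
--     """Remove binary file diffs, keeping only text changes."""
--     lines = diff.splitlines(keepends=True)
--     # group lines into per-file segments starting at each 'diff --git ' header
--     segments = []
--     current = []
--     for line in lines:
--         if line.startswith("diff --git "):
--             segments.append(current)
--             current = [line]
--         else:
--             current.append(line)
--     segments.append(current)
--     # within each segment keep only the lines before the first binary marker
--     out = []
--     for seg in segments:
--         for line in seg:
--             if line.startswith("Binary files ") or line.startswith("GIT binary patch"):
--                 break
--             out.append(line)
--     return "".join(out)
-- ===== Notes on version B (the rewrite author's own statement) =====
-- stated objective: alternative
-- what changed: Replaces the running skip-flag state machine with a group-and-truncate pass: split the kept-ends lines into per-file segments at each header line, truncate each segment at its first binary marker, and concatenate.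
import Mathlib
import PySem

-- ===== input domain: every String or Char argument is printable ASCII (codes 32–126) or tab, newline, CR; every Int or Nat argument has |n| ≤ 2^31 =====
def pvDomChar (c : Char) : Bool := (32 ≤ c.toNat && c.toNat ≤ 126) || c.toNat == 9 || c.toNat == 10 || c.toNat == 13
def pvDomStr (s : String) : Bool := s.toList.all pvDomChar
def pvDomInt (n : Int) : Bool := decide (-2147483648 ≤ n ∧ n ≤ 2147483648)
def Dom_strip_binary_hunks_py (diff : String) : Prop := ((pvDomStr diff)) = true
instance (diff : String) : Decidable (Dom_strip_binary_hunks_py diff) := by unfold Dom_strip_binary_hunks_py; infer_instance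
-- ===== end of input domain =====

-- B replaces A's running skip-flag state machine by splitting the kept-ends line list
-- into per-file segments at each per-file header line and truncating each segment at
-- its first binary marker (objective: alternative decomposition, same cost).


-- shared helper for both ports: diff.splitlines(keepends=True).
-- Hand-ported (PySem has only the keepends=False form); exact on the Dom alphabet,
-- where the only line breaks are '\n', '\r' and '\r\n'.
def pvSplitKeepends (acc : List Char) : List Char → List (List Char)
  | [] => if acc = [] then [] else [acc.reverse]
  | '\r' :: '\n' :: rest => (acc.reverse ++ ['\r', '\n']) :: pvSplitKeepends [] rest
  | c :: rest =>
      if c = '\n' ∨ c = '\r' then (acc.reverse ++ [c]) :: pvSplitKeepends [] rest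
      else pvSplitKeepends (c :: acc) rest

-- line.startswith(p) on the kept-ends lines (both Pythons use it)
def pvSw (l p : List Char) : Bool := PySem.Chars.startswith l p

def pvIsBinary (l : List Char) : Bool :=
  pvSw l "Binary files ".toList || pvSw l "GIT binary patch".toList

def pvIsHeader (l : List Char) : Bool := pvSw l "diff --git ".toList

-- ===== PORT A =====
-- the for-loop of A, carrying (result, skip) exactly as the Python does
def stripGoA (result : List (List Char)) (skip : Bool) : List (List Char) → List (List Char)
  | [] => result
  | line :: rest =>
      if pvIsBinary line then stripGoA result true rest
      else
        let skip' := if skip && pvIsHeader line then false else skip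
        if !skip' then stripGoA (result ++ [line]) skip' rest
        else stripGoA result skip' rest

def strip_binary_hunks_py (diff : String) : String :=
  String.mk (PySem.Chars.join [] (stripGoA [] false (pvSplitKeepends [] diff.toList)))

-- ===== PORT B =====
-- split the line list into segments, starting a new one at each 'diff --git ' header
def pvSegs (cur : List (List Char)) : List (List Char) → List (List (List Char))
  | [] => [cur]
  | l :: rest =>
      if pvIsHeader l then cur :: pvSegs [l] rest
      else pvSegs (cur ++ [l]) rest

-- the inner for-loop with break: keep the lines before the first binary marker
def pvKeep : List (List Char) → List (List Char)
  | [] => []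
  | l :: rest => if pvIsBinary l then [] else l :: pvKeep rest

def strip_binary_hunks_py_alt (diff : String) : String :=
  String.mk (PySem.Chars.join []
    ((pvSegs [] (pvSplitKeepends [] diff.toList)).flatMap pvKeep))

-- ===== PRECONDITION & SPEC =====
def Spec_strip_binary_hunks_py (diff : String) (out : String) : Prop := out = strip_binary_hunks_py_alt diff
instance (diff : String) (out : String) : Decidable (Spec_strip_binary_hunks_py diff out) := by unfold Spec_strip_binary_hunks_py; infer_instance

-- ===== CLAIM (what is proved, stated in full; the proofs are below) =====
def Claim_equal_strip_binary_hunks_py : Prop := ∀ (diff : String), Dom_strip_binary_hunks_py diff → Spec_strip_binary_hunks_py diff (strip_binary_hunks_py diff)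

-- ===== LEMMAS AND PROOFS =====

-- common specification both ports are reduced to
def pvSpecF (skip : Bool) : List (List Char) → List (List Char)
  | [] => []
  | l :: rest =>
      if pvIsBinary l then pvSpecF true rest
      else if pvIsHeader l then l :: pvSpecF false rest
      else if skip then pvSpecF true rest
      else l :: pvSpecF false rest

lemma header_not_binary (l : List Char) (h : pvIsHeader l = true) : pvIsBinary l = false := by
  cases l with
  | nil => simp [pvIsHeader, pvSw, PySem.Chars.startswith_iff, List.prefix_nil] at h
  | cons c t =>
    simp only [pvIsHeader, pvSw, PySem.Chars.startswith_iff] at h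
    rw [show ("diff --git ".toList) = 'd' :: "iff --git ".toList from rfl, List.cons_prefix_cons] at h
    simp only [pvIsBinary, pvSw, Bool.or_eq_false_iff]
    constructor <;>
    · rw [Bool.eq_false_iff]
      intro hb
      rw [PySem.Chars.startswith_iff] at hb
      first
        | rw [show ("Binary files ".toList) = 'B' :: "inary files ".toList from rfl, List.cons_prefix_cons] at hb
        | rw [show ("GIT binary patch".toList) = 'G' :: "IT binary patch".toList from rfl, List.cons_prefix_cons] at hb
      rw [← h.1] at hb
      exact absurd hb.1 (by decide)

lemma stripGoA_eq (lines : List (List Char)) :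
    ∀ (result : List (List Char)) (skip : Bool),
      stripGoA result skip lines = result ++ pvSpecF skip lines := by
  induction lines with
  | nil => intro result skip; simp [stripGoA, pvSpecF]
  | cons l rest ih =>
    intro result skip
    by_cases hb : pvIsBinary l = true
    · simp [stripGoA, pvSpecF, hb, ih]
    · rw [Bool.not_eq_true] at hb
      by_cases hh : pvIsHeader l = true
      · cases skip <;> simp [stripGoA, pvSpecF, hb, hh, ih]
      · rw [Bool.not_eq_true] at hh
        cases skip <;> simp [stripGoA, pvSpecF, hb, hh, ih]

lemma pvKeep_snoc (cur : List (List Char)) (l : List Char) :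
    pvKeep (cur ++ [l]) =
      pvKeep cur ++ (if cur.any pvIsBinary || pvIsBinary l then ([] : List (List Char)) else [l]) := by
  induction cur with
  | nil => by_cases h : pvIsBinary l = true <;> simp [pvKeep, h]
  | cons x s ih =>
    by_cases hx : pvIsBinary x = true
    · simp [pvKeep, hx]
    · rw [Bool.not_eq_true] at hx
      simp [pvKeep, hx, ih]

lemma pvSegs_eq (lines : List (List Char)) :
    ∀ (cur : List (List Char)),
      (pvSegs cur lines).flatMap pvKeep = pvKeep cur ++ pvSpecF (cur.any pvIsBinary) lines := by
  induction lines with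
  | nil => intro cur; simp [pvSegs, pvSpecF]
  | cons l rest ih =>
    intro cur
    by_cases hh : pvIsHeader l = true
    · have hb := header_not_binary l hh
      simp [pvSegs, pvSpecF, hh, hb, ih, pvKeep]
    · rw [Bool.not_eq_true] at hh
      by_cases hbl : pvIsBinary l = true
      · simp [pvSegs, pvSpecF, hh, hbl, ih, pvKeep_snoc]
      · rw [Bool.not_eq_true] at hbl
        by_cases hc : cur.any pvIsBinary = true
        · simp [pvSegs, pvSpecF, hh, hbl, hc, ih, pvKeep_snoc]
        · rw [Bool.not_eq_true] at hc
          simp [pvSegs, pvSpecF, hh, hbl, hc, ih, pvKeep_snoc]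

-- ===== VERDICT (by name: the statement is the Claim_ definition above) =====
theorem strip_binary_hunks_py_spec : Claim_equal_strip_binary_hunks_py := by
  intro diff _
  unfold Spec_strip_binary_hunks_py strip_binary_hunks_py strip_binary_hunks_py_alt
  rw [pvSegs_eq, stripGoA_eq]
  simp [pvKeep]
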